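-- pv_equiv track=rewrite | github.com/ukrobotics/DispenseLibPython | examples/example_cycletime.py | generate_well_names
-- ===== SOURCE A (Python) =====
-- from typing import List, Dict, Any, Tuple, Optional
--
-- def generate_well_names(rows: int, cols: int) -> List[str]:
--     """Generates a list of well names in row-major order (A1, A2, etc.)."""
--     def get_row_label(r_idx: int) -> str:
--         label = ""
--         while r_idx >= 0:
--             label = chr(ord('A') + r_idx % 26) + label
--             r_idx = r_idx // 26 - 1
--         return label
--     return [f"{get_row_label(r)}{c+1}" for r in range(rows) for c in range(cols)]
-- ===== SOURCE B (Python) =====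
-- from typing import List
--
-- def generate_well_names(rows: int, cols: int) -> List[str]:
--     """Generates a list of well names in row-major order (A1, A2, etc.)."""
--     def succ(s: str) -> str:
--         # spreadsheet-style successor: "" -> "A", "A" -> "B", "Z" -> "AA", "AZ" -> "BA"
--         chars = list(s)
--         i = len(chars) - 1
--         while i >= 0 and chars[i] == 'Z':
--             chars[i] = 'A'
--             i -= 1
--         if i < 0:
--             return 'A' + ''.join(chars)
--         chars[i] = chr(ord(chars[i]) + 1)
--         return ''.join(chars)
--
--     labels = []
--     label = ""
--     for _ in range(rows):
--         label = succ(label)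
--         labels.append(label)
--     return [f"{lab}{c}" for lab in labels for c in range(1, cols + 1)]
-- ===== Notes on version B (the rewrite author's own statement) =====
-- stated objective: alternative
-- what changed: Row labels are built once by spreadsheet-style carry-propagating succession (Z->AA) into a table, then names are assembled in a second pass, instead of recomputing each label via base-26 division inside the comprehension.
import Mathlib
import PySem

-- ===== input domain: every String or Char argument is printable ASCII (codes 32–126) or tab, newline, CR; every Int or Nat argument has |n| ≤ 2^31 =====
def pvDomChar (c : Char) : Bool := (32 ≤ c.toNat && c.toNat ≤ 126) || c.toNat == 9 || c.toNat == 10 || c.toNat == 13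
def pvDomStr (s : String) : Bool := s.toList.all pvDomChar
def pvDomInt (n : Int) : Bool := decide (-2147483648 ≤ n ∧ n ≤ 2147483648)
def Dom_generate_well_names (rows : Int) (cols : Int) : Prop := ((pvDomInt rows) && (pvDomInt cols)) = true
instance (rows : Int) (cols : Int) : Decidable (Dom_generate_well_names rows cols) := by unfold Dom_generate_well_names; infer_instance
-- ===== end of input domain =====

-- B builds the row labels once by spreadsheet-style carry-propagating succession (Z -> AA)
-- and assembles the names in a second pass, instead of recomputing each label by base-26
-- division inside the innermost loop: an alternative decomposition, same cost.

-- ===== PORT A =====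
-- the `while r_idx >= 0` loop of get_row_label, accumulating by prepending chars
def getRowLabelLoop (r_idx : Int) (label : List Char) : List Char :=
  if h : 0 ≤ r_idx then
    getRowLabelLoop (PySem.Int.floordiv r_idx 26 - 1)
      (Char.ofNat (65 + PySem.Int.mod r_idx 26).toNat :: label)
  else label
termination_by (r_idx + 1).toNat
decreasing_by
  rw [PySem.Int.floordiv_eq_ediv_of_pos (by norm_num)]
  have h2 := Int.ediv_le_self 26 h
  omega

def get_row_label (r_idx : Int) : String := String.ofList (getRowLabelLoop r_idx [])

def generate_well_names (rows : Int) (cols : Int) : List String :=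
  (PySem.List.pyRange 0 rows 1).flatMap fun r =>
    (PySem.List.pyRange 0 cols 1).map fun c =>
      get_row_label r ++ PySem.Int.toStr (c + 1)

-- ===== PORT B =====
-- Source B's `succ`: the right-to-left carry scan, transcribed as recursion on the reversed chars
def succRevLoop : List Char → List Char
  | [] => ['A']
  | c :: rest => if c == 'Z' then 'A' :: succRevLoop rest
                 else Char.ofNat (c.toNat + 1) :: rest

def succLabel (s : List Char) : List Char := (succRevLoop s.reverse).reverse

-- Source B's `for _ in range(rows)` loop filling `labels` (accumulator = the labels built so far, reversed)
def buildLabels : Nat → List Char → List (List Char) → List (List Char)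
  | 0, _, acc => acc.reverse
  | n + 1, lab, acc =>
    let lab' := succLabel lab
    buildLabels n lab' (lab' :: acc)

def generate_well_names_alt (rows : Int) (cols : Int) : List String :=
  (buildLabels rows.toNat [] []).flatMap fun lab =>
    (PySem.List.pyRange 1 (cols + 1) 1).map fun c =>
      String.ofList lab ++ PySem.Int.toStr c

-- ===== PRECONDITION & SPEC =====
def Spec_generate_well_names (rows : Int) (cols : Int) (out : List String) : Prop := out = generate_well_names_alt rows cols
instance (rows : Int) (cols : Int) (out : List String) : Decidable (Spec_generate_well_names rows cols out) := by unfold Spec_generate_well_names; infer_instance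

-- ===== CLAIM (what is proved, stated in full; the proofs are below) =====
def Claim_equal_generate_well_names : Prop := ∀ (rows : Int) (cols : Int), Dom_generate_well_names rows cols → Spec_generate_well_names rows cols (generate_well_names rows cols)

-- ===== LEMMAS AND PROOFS =====

-- the bijective base-26 label of row n, as a pure function of n
def labelN (n : Nat) : List Char :=
  if h : n < 26 then [Char.ofNat (65 + n)]
  else labelN (n / 26 - 1) ++ [Char.ofNat (65 + n % 26)]
termination_by n
decreasing_by
  have := Nat.div_lt_self (by omega : 0 < n) (by norm_num : 1 < 26)
  omega

theorem labelN_small {n : Nat} (h : n < 26) : labelN n = [Char.ofNat (65 + n)] := by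
  rw [labelN]; simp [h]

theorem labelN_big {n : Nat} (h : ¬ n < 26) :
    labelN n = labelN (n / 26 - 1) ++ [Char.ofNat (65 + n % 26)] := by
  rw [labelN]; simp [h]

theorem floordiv_natCast26 (n : Nat) :
    PySem.Int.floordiv (n : Int) 26 = ((n / 26 : Nat) : Int) := by
  rw [PySem.Int.floordiv_eq_ediv_of_pos (by norm_num)]; omega

theorem mod_natCast26 (n : Nat) :
    PySem.Int.mod (n : Int) 26 = ((n % 26 : Nat) : Int) := by
  rw [PySem.Int.mod_eq_emod_of_pos (by norm_num)]; omega

theorem getRowLabelLoop_eq (n : Nat) :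
    ∀ acc, getRowLabelLoop (n : Int) acc = labelN n ++ acc := by
  induction n using Nat.strong_induction_on with
  | _ n ih =>
    intro acc
    rw [getRowLabelLoop, dif_pos (Int.natCast_nonneg n), floordiv_natCast26, mod_natCast26]
    have hc : (65 + ((n % 26 : Nat) : Int)).toNat = 65 + n % 26 := by omega
    rw [hc]
    by_cases h : n < 26
    · have h0 : n / 26 = 0 := Nat.div_eq_of_lt h
      have h1 : n % 26 = n := Nat.mod_eq_of_lt h
      rw [h0, h1, getRowLabelLoop, dif_neg (by norm_num), labelN_small h]
      simp
    · have hd : 1 ≤ n / 26 := by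
        have := (Nat.le_div_iff_mul_le (by norm_num : 0 < 26)).mpr (by omega : 1 * 26 ≤ n)
        omega
      have hcast : ((n / 26 : Nat) : Int) - 1 = ((n / 26 - 1 : Nat) : Int) := by omega
      have hlt : n / 26 - 1 < n := by
        have := Nat.div_lt_self (by omega : 0 < n) (by norm_num : 1 < 26)
        omega
      rw [hcast, ih (n / 26 - 1) hlt, labelN_big h]
      simp

theorem char_ne_Z : ∀ k, k < 25 → (Char.ofNat (65 + k) == 'Z') = false := by decide
theorem char_succ : ∀ k, k < 25 →
    Char.ofNat ((Char.ofNat (65 + k)).toNat + 1) = Char.ofNat (65 + (k + 1)) := by decide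

theorem succRevLoop_labelN (n : Nat) :
    succRevLoop ((labelN n).reverse) = (labelN (n + 1)).reverse := by
  induction n using Nat.strong_induction_on with
  | _ n ih =>
    by_cases h : n < 26
    · by_cases h25 : n < 25
      · rw [labelN_small h, labelN_small (by omega : n + 1 < 26)]
        simp [succRevLoop, char_ne_Z n h25, char_succ n h25]
      · have hn : n = 25 := by omega
        subst hn
        rw [labelN_small h, labelN_big (by norm_num : ¬ 26 < 26)]
        norm_num [labelN_small]
        simp [succRevLoop]
    · rw [labelN_big h]
      by_cases hk : n % 26 < 25
      · rw [labelN_big (by omega : ¬ n + 1 < 26)]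
        have e1 : (n + 1) / 26 = n / 26 := by omega
        have e2 : (n + 1) % 26 = n % 26 + 1 := by omega
        rw [e1, e2]
        simp [succRevLoop, char_ne_Z _ hk, char_succ _ hk]
      · have hk25 : n % 26 = 25 := by omega
        rw [labelN_big (by omega : ¬ n + 1 < 26)]
        have e1 : (n + 1) / 26 - 1 = n / 26 - 1 + 1 := by omega
        have e2 : (n + 1) % 26 = 0 := by omega
        rw [e1, e2, hk25]
        have hlt : n / 26 - 1 < n := by
          have := Nat.div_lt_self (by omega : 0 < n) (by norm_num : 1 < 26)
          omega
        simp [succRevLoop, ← ih (n / 26 - 1) hlt]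

theorem succLabel_labelN (n : Nat) : succLabel (labelN n) = labelN (n + 1) := by
  simp [succLabel, succRevLoop_labelN]

theorem succLabel_nil : succLabel [] = labelN 0 := by
  rw [labelN_small (by norm_num)]
  simp [succLabel, succRevLoop]

theorem buildLabels_eq (n : Nat) : ∀ (k : Nat) (lab : List Char) (acc : List (List Char)),
    succLabel lab = labelN k →
    buildLabels n lab acc = acc.reverse ++ (List.range n).map (fun i => labelN (k + i)) := by
  induction n with
  | zero => intro k lab acc _; simp [buildLabels]
  | succ n ih =>
    intro k lab acc hlab
    rw [buildLabels]
    simp only [hlab]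
    rw [ih (k + 1) (labelN k) (labelN k :: acc) (succLabel_labelN k),
      List.range_succ_eq_map, List.map_cons, List.map_map]
    have h0 : labelN (k + 0) = labelN k := by norm_num
    rw [h0]
    simp only [List.reverse_cons, List.append_assoc, List.singleton_append]
    refine congrArg _ (congrArg (List.cons _) ?_)
    apply List.map_congr_left
    intro a _
    simp only [Function.comp]
    congr 1
    omega

theorem range_shift {α : Type} (n : Int) (g : Int → α) :
    (PySem.List.pyRange 0 n 1).map (fun c => g (c + 1)) =
    (PySem.List.pyRange 1 (n + 1) 1).map g := by
  rw [PySem.List.pyRange_one, PySem.List.pyRange_one]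
  have h : (n + 1 - 1).toNat = (n - 0).toNat := by omega
  rw [h]
  simp only [List.map_map]
  apply List.map_congr_left
  intro k _
  simp only [Function.comp]
  ring_nf

theorem main_eq (rows cols : Int) :
    generate_well_names rows cols = generate_well_names_alt rows cols := by
  unfold generate_well_names generate_well_names_alt
  rw [buildLabels_eq rows.toNat 0 [] [] succLabel_nil]
  simp only [List.reverse_nil, List.nil_append]
  rw [
    PySem.List.pyRange_one 0 rows, List.flatMap_map, List.flatMap_map]
  simp only [Int.sub_zero]
  apply List.flatMap_congr
  intro k _
  simp only [zero_add]
  rw [range_shift cols (fun c => get_row_label (k : Int) ++ PySem.Int.toStr c)]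
  unfold get_row_label
  rw [getRowLabelLoop_eq k []]
  simp

-- ===== VERDICT (by name: the statement is the Claim_ definition above) =====
theorem generate_well_names_spec : Claim_equal_generate_well_names := by
  intro rows cols _
  unfold Spec_generate_well_names
  exact main_eq rows cols
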